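-- pv_equiv track=rewrite | github.com/rramji/atlas-toolkit | atlas_toolkit/lammps/topology.py | enumerate_torsions
-- ===== SOURCE A (Python) =====
-- def enumerate_torsions(bonds_dict: dict) -> list[tuple[int, int, int, int]]:
--     """Return (i, j, k, l) 4-tuples for every proper dihedral.
--
--     Canonical form: tuple is lexicographically ≤ its reverse.
--     """
--     seen: set[tuple[int, int, int, int]] = set()
--     result: list[tuple[int, int, int, int]] = []
--     for j in bonds_dict:
--         for k in bonds_dict[j]:
--             if k <= j:
--                 continue  # process each j-k bond once
--             for i in bonds_dict[j]:
--                 if i == k: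
--                     continue
--                 for l in bonds_dict[k]:
--                     if l == j:
--                         continue
--                     if l == i:
--                         continue  # avoid i==l (degenerate)
--                     fwd = (i, j, k, l)
--                     rev = (l, k, j, i)
--                     canon = min(fwd, rev)
--                     if canon not in seen:
--                         seen.add(canon)
--                         result.append(canon)
--     result.sort()
--     return result
-- ===== SOURCE B (Python) =====
-- def enumerate_torsions(bonds_dict: dict) -> list[tuple[int, int, int, int]]:
--     # Phase 1: table of all length-2 "angle" paths (i, j, k), central bond in both orientations.
--     angles = []
--     for j, nbrs in bonds_dict.items():
--         for k in nbrs: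
--             if k <= j:
--                 continue
--             for i in nbrs:
--                 if i != k:
--                     angles.append((i, j, k))
--             if k in bonds_dict:
--                 for i in bonds_dict[k]:
--                     if i != j:
--                         angles.append((i, k, j))
--     # Phase 2: extend each angle by a fourth atom, canonicalize, dedup via a set.
--     seen = set()
--     for (i, j, k) in angles:
--         for l in bonds_dict[k]:
--             if l != j and l != i:
--                 fwd = (i, j, k, l)
--                 rev = (l, k, j, i)
--                 seen.add(min(fwd, rev))
--     return sorted(seen)
-- ===== Notes on version B (the rewrite author's own statement) =====
-- stated objective: alternative
-- what changed: B is a two-phase generate-all-then-canonicalize pass: it first materializes a table of all length-2 angle paths (i,j,k) with each central bond taken in BOTH orientations (the reverse orientation guarded by 'k in bonds_dict'), then in a second differently-shaped pass extends every angle by a fourth atom and canonicalizes into a set that genuinely deduplicates the doubly-generated dihedrals, returning sorted(set) -- instead of A's single nested loop that visits each bond once (k>j trick), guards a result list with the set, and sorts the list in place.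
import Mathlib
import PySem

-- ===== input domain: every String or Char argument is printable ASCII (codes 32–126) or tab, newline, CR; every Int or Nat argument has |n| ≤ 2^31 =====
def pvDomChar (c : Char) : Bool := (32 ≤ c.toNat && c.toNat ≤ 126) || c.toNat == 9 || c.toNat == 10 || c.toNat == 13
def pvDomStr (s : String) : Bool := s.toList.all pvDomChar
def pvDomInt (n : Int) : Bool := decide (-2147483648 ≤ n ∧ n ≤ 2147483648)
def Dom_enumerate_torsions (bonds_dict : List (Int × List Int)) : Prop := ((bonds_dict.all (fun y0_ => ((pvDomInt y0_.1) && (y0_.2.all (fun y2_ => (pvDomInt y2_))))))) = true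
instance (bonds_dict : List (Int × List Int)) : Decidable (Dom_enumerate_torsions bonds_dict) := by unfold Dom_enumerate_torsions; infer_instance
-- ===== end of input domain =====

-- B is a two-phase generate-all-then-canonicalize pass (angle table with both bond orientations,
-- then extend + canonicalize into a set) instead of A's single nested visit-each-bond-once loop;
-- same cost, alternative decomposition.

-- Python tuple comparison is lexicographic: compare 4-tuples through their component list (exact).
def tkey4 (t : Int × Int × Int × Int) : List Int := [t.1, t.2.1, t.2.2.1, t.2.2.2]

-- Python min(a, b) on two 4-tuples: b only if strictly smaller (ties keep a) — exact.
def pymin4 (a b : Int × Int × Int × Int) : Int × Int × Int × Int :=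
  if tkey4 b < tkey4 a then b else a

-- ===== PORT A =====
def enumerate_torsions (bonds_dict : List (Int × List Int)) : List (Int × Int × Int × Int) :=
  let d := PySem.Dict.ofList bonds_dict
  let st :=
    d.items.foldl (fun (st : PySem.Set (Int × Int × Int × Int) × List (Int × Int × Int × Int)) jns =>
      jns.2.foldl (fun st k =>
        if k ≤ jns.1 then st else                              -- 'if k <= j: continue'
        jns.2.foldl (fun st i =>
          if i = k then st else                                -- 'if i == k: continue'
          (d.getD k []).foldl (fun st l =>                     -- 'for l in bonds_dict[k]' (KeyError excluded by Pre_)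
            if l = jns.1 then st else                          -- 'if l == j: continue'
            if l = i then st else                              -- 'if l == i: continue'
            let canon := pymin4 (i, jns.1, k, l) (l, k, jns.1, i)
            if canon ∈ st.1 then st
            else (PySem.Set.add st.1 canon, st.2 ++ [canon])
          ) st) st) st)
      ((PySem.Set.empty : PySem.Set (Int × Int × Int × Int)), [])
  PySem.List.sorted st.2 tkey4                                 -- 'result.sort()'

-- ===== PORT B =====
def enumerate_torsions_alt (bonds_dict : List (Int × List Int)) : List (Int × Int × Int × Int) :=
  let d := PySem.Dict.ofList bonds_dict
  -- phase 1: angle table, each central bond in both orientations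
  let angles :=
    d.items.foldl (fun (acc : List (Int × Int × Int)) jns =>
      jns.2.foldl (fun acc k =>
        if k ≤ jns.1 then acc else
        let acc := jns.2.foldl (fun acc i =>
          if i ≠ k then acc ++ [(i, jns.1, k)] else acc) acc
        if d.contains k then                                   -- 'if k in bonds_dict:'
          (d.getD k []).foldl (fun acc i =>
            if i ≠ jns.1 then acc ++ [(i, k, jns.1)] else acc) acc
        else acc
      ) acc) []
  -- phase 2: extend each angle, canonicalize, dedup via a set
  let seen :=
    angles.foldl (fun (seen : PySem.Set (Int × Int × Int × Int)) t =>
      (d.getD t.2.2 []).foldl (fun seen l =>                   -- 'for l in bonds_dict[k]' (KeyError excluded by Pre_)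
        if l ≠ t.2.1 ∧ l ≠ t.1 then
          PySem.Set.add seen (pymin4 (t.1, t.2.1, t.2.2, l) (l, t.2.2, t.2.1, t.1))
        else seen) seen) PySem.Set.empty
  PySem.List.sorted seen tkey4                                 -- 'sorted(seen)'

-- ===== PRECONDITION & SPEC =====
-- Pre_ excludes exactly the inputs where Python A (and B) raise KeyError: a neighbour k > j of a
-- key j where k is itself no key, while j has another neighbour i ≠ k (so 'bonds_dict[k]' is
-- reached). The dict is read off the raw pair list as Python does: last value per key wins.
def Pre_enumerate_torsions (bonds_dict : List (Int × List Int)) : Prop :=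
  ∀ p ∈ bonds_dict, ∀ k ∈ ((bonds_dict.reverse.lookup p.1).getD []), p.1 < k →
    bonds_dict.reverse.lookup k = none →
    ∀ i ∈ ((bonds_dict.reverse.lookup p.1).getD []), i = k
instance (bonds_dict : List (Int × List Int)) : Decidable (Pre_enumerate_torsions bonds_dict) := by
  unfold Pre_enumerate_torsions; infer_instance

def pvWitness_enumerate_torsions : (List (Int × List Int)) :=
  [(0, [1]), (1, [0, 2]), (2, [1, 3]), (3, [2])]

def Spec_enumerate_torsions (bonds_dict : List (Int × List Int)) (out : List (Int × Int × Int × Int)) : Prop := out = enumerate_torsions_alt bonds_dict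
instance (bonds_dict : List (Int × List Int)) (out : List (Int × Int × Int × Int)) : Decidable (Spec_enumerate_torsions bonds_dict out) := by unfold Spec_enumerate_torsions; infer_instance

-- ===== CLAIM (what is proved, stated in full; the proofs are below) =====
def Claim_equal_enumerate_torsions : Prop := ∀ (bonds_dict : List (Int × List Int)), Dom_enumerate_torsions bonds_dict → Pre_enumerate_torsions bonds_dict → Spec_enumerate_torsions bonds_dict (enumerate_torsions bonds_dict)


-- ===== LEMMAS AND PROOFS =====

theorem tkey4_inj : Function.Injective tkey4 := by
  intro ⟨a1, a2, a3, a4⟩ ⟨b1, b2, b3, b4⟩ h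
  simp [tkey4] at h
  simp [h.1, h.2.1, h.2.2.1, h.2.2.2]

theorem pymin4_comm (a b : Int × Int × Int × Int) : pymin4 a b = pymin4 b a := by
  unfold pymin4
  rcases lt_trichotomy (tkey4 a) (tkey4 b) with h | h | h
  · rw [if_neg (by exact not_lt.mpr h.le), if_pos h]
  · have : a = b := tkey4_inj h
    subst this; rfl
  · rw [if_pos h, if_neg (by exact not_lt.mpr h.le)]

-- the dedup step of A: insert into the set and append to the result list only when new
def stepA (st : PySem.Set (Int × Int × Int × Int) × List (Int × Int × Int × Int))
    (c : Int × Int × Int × Int) :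
    PySem.Set (Int × Int × Int × Int) × List (Int × Int × Int × Int) :=
  if c ∈ st.1 then st else (PySem.Set.add st.1 c, st.2 ++ [c])

-- A's (seen, result) pair stays equal componentwise and is the Set.add fold
theorem foldl_stepA (cs : List (Int × Int × Int × Int)) (s : PySem.Set (Int × Int × Int × Int)) :
    cs.foldl stepA (s, s) = (cs.foldl PySem.Set.add s, cs.foldl PySem.Set.add s) := by
  induction cs generalizing s with
  | nil => rfl
  | cons c cs ih =>
    have hstep : stepA (s, s) c = (PySem.Set.add s c, PySem.Set.add s c) := by
      unfold stepA
      by_cases h : c ∈ s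
      · simp [h]
      · simp [h]
    simp only [List.foldl_cons, hstep, ih]

-- a loop whose body is 'if guard: continue' around an inner loop, flattened
theorem foldl_skip_flat {α β δ : Type} (p : α → Prop) [DecidablePred p]
    (g : α → List β) (step : δ → β → δ) (l : List α) (init : δ) :
    l.foldl (fun acc x => if p x then acc else (g x).foldl step acc) init
      = ((l.filter (fun x => decide (¬ p x))).flatMap g).foldl step init := by
  refine (PySem.List.foldl_congr_mem l _
        (fun acc x => if ¬ p x then (g x).foldl step acc else acc) init
        (by intro acc x _; by_cases h : p x <;> simp [h])).trans ?_
  rw [PySem.List.foldl_ite_eq_foldl_filter, ← List.foldl_flatMap]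

-- innermost loop of A: two 'continue' guards, then the dedup step on the canonical tuple
theorem foldl_skip2_map {α β δ : Type} (p q : α → Prop) [DecidablePred p] [DecidablePred q]
    (f : α → β) (step : δ → β → δ) (l : List α) (init : δ) :
    l.foldl (fun acc x => if p x then acc else if q x then acc else step acc (f x)) init
      = ((l.filter (fun x => decide (¬ p x ∧ ¬ q x))).map f).foldl step init := by
  refine (PySem.List.foldl_congr_mem l _
        (fun acc x => if ¬ p x ∧ ¬ q x then step acc (f x) else acc) init
        (by intro acc x _; by_cases h : p x <;> by_cases h' : q x <;> simp [h, h'])).trans ?_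
  rw [PySem.List.foldl_ite_eq_foldl_filter, List.foldl_map]

-- a loop whose body is 'if guard: continue' around appends, flattened
theorem foldl_skip_append {α β : Type} (p : α → Prop) [DecidablePred p]
    (g : α → List β) (l : List α) (init : List β) :
    l.foldl (fun acc x => if p x then acc else acc ++ g x) init
      = init ++ (l.filter (fun x => decide (¬ p x))).flatMap g := by
  refine (PySem.List.foldl_congr_mem l _
        (fun acc x => if ¬ p x then acc ++ g x else acc) init
        (by intro acc x _; by_cases h : p x <;> simp [h])).trans ?_
  rw [PySem.List.foldl_ite_eq_foldl_filter, PySem.List.foldl_append_eq_flatMap]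

-- the flat list of canonical tuples A's nested loops feed to the dedup step, in order
def csA (bd : List (Int × List Int)) : List (Int × Int × Int × Int) :=
  (PySem.Dict.ofList bd).items.flatMap (fun jns =>
    (jns.2.filter (fun k => decide (¬ k ≤ jns.1))).flatMap (fun k =>
      (jns.2.filter (fun i => decide (¬ i = k))).flatMap (fun i =>
        (((PySem.Dict.ofList bd).getD k []).filter
            (fun l => decide (¬ l = jns.1 ∧ ¬ l = i))).map
          (fun l => pymin4 (i, jns.1, k, l) (l, k, jns.1, i)))))

-- B's angle table as a flat list
def angB (bd : List (Int × List Int)) : List (Int × Int × Int) :=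
  (PySem.Dict.ofList bd).items.flatMap (fun jns =>
    (jns.2.filter (fun k => decide (¬ k ≤ jns.1))).flatMap (fun k =>
      (jns.2.filter (fun i => decide (i ≠ k))).map (fun i => (i, jns.1, k)) ++
      (if (PySem.Dict.ofList bd).contains k then
        (((PySem.Dict.ofList bd).getD k []).filter (fun i => decide (i ≠ jns.1))).map
          (fun i => (i, k, jns.1))
       else [])))

-- the flat list of canonical tuples B's second pass inserts into the set, in order
def csB (bd : List (Int × List Int)) : List (Int × Int × Int × Int) :=
  (angB bd).flatMap (fun t =>
    (((PySem.Dict.ofList bd).getD t.2.2 []).filter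
        (fun l => decide (l ≠ t.2.1 ∧ l ≠ t.1))).map
      (fun l => pymin4 (t.1, t.2.1, t.2.2, l) (l, t.2.2, t.2.1, t.1)))

-- the inner generator pieces of csA (proof-side only)
def glA (bd : List (Int × List Int)) (j k i : Int) : List (Int × Int × Int × Int) :=
  (((PySem.Dict.ofList bd).getD k []).filter (fun l => decide (¬ l = j ∧ ¬ l = i))).map
    (fun l => pymin4 (i, j, k, l) (l, k, j, i))

def giA (bd : List (Int × List Int)) (jns : Int × List Int) (k : Int) :
    List (Int × Int × Int × Int) :=
  (jns.2.filter (fun i => decide (¬ i = k))).flatMap (fun i => glA bd jns.1 k i)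

def gkA (bd : List (Int × List Int)) (jns : Int × List Int) : List (Int × Int × Int × Int) :=
  (jns.2.filter (fun k => decide (¬ k ≤ jns.1))).flatMap (fun k => giA bd jns k)

theorem csA_eq_flat (bd : List (Int × List Int)) :
    csA bd = (PySem.Dict.ofList bd).items.flatMap (fun jns => gkA bd jns) := rfl

theorem A_eq (bd : List (Int × List Int)) :
    enumerate_torsions bd = PySem.List.sorted (PySem.Set.ofList (csA bd)) tkey4 := by
  simp only [enumerate_torsions]
  have hl : ∀ (j k i : Int) (st : PySem.Set (Int × Int × Int × Int) × List (Int × Int × Int × Int)),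
      ((PySem.Dict.ofList bd).getD k []).foldl (fun st l =>
          if l = j then st else if l = i then st else
          stepA st (pymin4 (i, j, k, l) (l, k, j, i))) st
        = (glA bd j k i).foldl stepA st := by
    intro j k i st
    exact foldl_skip2_map (fun l => l = j) (fun l => l = i)
      (fun l => pymin4 (i, j, k, l) (l, k, j, i)) stepA _ st
  have hi : ∀ (jns : Int × List Int) (k : Int) st,
      jns.2.foldl (fun st i =>
          if i = k then st else
          ((PySem.Dict.ofList bd).getD k []).foldl (fun st l =>
            if l = jns.1 then st else if l = i then st else
            stepA st (pymin4 (i, jns.1, k, l) (l, k, jns.1, i))) st) st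
        = (giA bd jns k).foldl stepA st := by
    intro jns k st
    refine (PySem.List.foldl_congr_mem _ _
        (fun st i => if i = k then st else (glA bd jns.1 k i).foldl stepA st) st ?_).trans ?_
    · intro st i _
      by_cases h : i = k
      · simp [h]
      · simp only [if_neg h]; exact hl jns.1 k i st
    · exact foldl_skip_flat (fun i => i = k) (fun i => glA bd jns.1 k i) stepA jns.2 st
  have hk : ∀ (jns : Int × List Int) st,
      jns.2.foldl (fun st k =>
          if k ≤ jns.1 then st else
          jns.2.foldl (fun st i =>
            if i = k then st else
            ((PySem.Dict.ofList bd).getD k []).foldl (fun st l =>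
              if l = jns.1 then st else if l = i then st else
              stepA st (pymin4 (i, jns.1, k, l) (l, k, jns.1, i))) st) st) st
        = (gkA bd jns).foldl stepA st := by
    intro jns st
    refine (PySem.List.foldl_congr_mem _ _
        (fun st k => if k ≤ jns.1 then st else (giA bd jns k).foldl stepA st) st ?_).trans ?_
    · intro st k _
      by_cases h : k ≤ jns.1
      · simp [h]
      · simp only [if_neg h]; exact hi jns k st
    · exact foldl_skip_flat (fun k => k ≤ jns.1) (fun k => giA bd jns k) stepA jns.2 st
  have houter :
      (PySem.Dict.ofList bd).items.foldl (fun st jns =>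
          jns.2.foldl (fun st k =>
            if k ≤ jns.1 then st else
            jns.2.foldl (fun st i =>
              if i = k then st else
              ((PySem.Dict.ofList bd).getD k []).foldl (fun st l =>
                if l = jns.1 then st else if l = i then st else
                stepA st (pymin4 (i, jns.1, k, l) (l, k, jns.1, i))) st) st) st)
        ((PySem.Set.empty : PySem.Set (Int × Int × Int × Int)), [])
        = (csA bd).foldl stepA (PySem.Set.empty, []) := by
    refine (PySem.List.foldl_congr_mem _ _
        (fun st jns => (gkA bd jns).foldl stepA st) _ ?_).trans ?_
    · intro st jns _; exact hk jns st
    · rw [csA_eq_flat]; exact List.foldl_flatMap.symm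
  refine Eq.trans (congrArg (fun r => PySem.List.sorted r.2 tkey4)
      (?_ : _ = ((csA bd).foldl PySem.Set.add PySem.Set.empty,
                 (csA bd).foldl PySem.Set.add PySem.Set.empty))) ?_
  · exact houter.trans (foldl_stepA (csA bd) PySem.Set.empty)
  · rfl

-- B's angle-table pieces (proof-side only)
def gB1 (bd : List (Int × List Int)) (jns : Int × List Int) (k : Int) : List (Int × Int × Int) :=
  (jns.2.filter (fun i => decide (i ≠ k))).map (fun i => (i, jns.1, k)) ++
  (if (PySem.Dict.ofList bd).contains k then
    (((PySem.Dict.ofList bd).getD k []).filter (fun i => decide (i ≠ jns.1))).map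
      (fun i => (i, k, jns.1))
   else [])

def extB (bd : List (Int × List Int)) (t : Int × Int × Int) : List (Int × Int × Int × Int) :=
  (((PySem.Dict.ofList bd).getD t.2.2 []).filter (fun l => decide (l ≠ t.2.1 ∧ l ≠ t.1))).map
    (fun l => pymin4 (t.1, t.2.1, t.2.2, l) (l, t.2.2, t.2.1, t.1))

theorem angB_eq_flat (bd : List (Int × List Int)) :
    angB bd = (PySem.Dict.ofList bd).items.flatMap (fun jns =>
      (jns.2.filter (fun k => decide (¬ k ≤ jns.1))).flatMap (fun k => gB1 bd jns k)) := rfl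

theorem csB_eq_flat (bd : List (Int × List Int)) :
    csB bd = (angB bd).flatMap (fun t => extB bd t) := rfl

theorem B_eq (bd : List (Int × List Int)) :
    enumerate_torsions_alt bd = PySem.List.sorted (PySem.Set.ofList (csB bd)) tkey4 := by
  simp only [enumerate_torsions_alt]
  have hk1 : ∀ (jns : Int × List Int) (acc : List (Int × Int × Int)),
      jns.2.foldl (fun acc k =>
          if k ≤ jns.1 then acc else
          if (PySem.Dict.ofList bd).contains k then
            ((PySem.Dict.ofList bd).getD k []).foldl (fun acc i =>
                if i ≠ jns.1 then acc ++ [(i, k, jns.1)] else acc)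
              (jns.2.foldl (fun acc i =>
                if i ≠ k then acc ++ [(i, jns.1, k)] else acc) acc)
          else
            jns.2.foldl (fun acc i =>
              if i ≠ k then acc ++ [(i, jns.1, k)] else acc) acc) acc
        = acc ++ (jns.2.filter (fun k => decide (¬ k ≤ jns.1))).flatMap (fun k => gB1 bd jns k) := by
    intro jns acc
    refine (PySem.List.foldl_congr_mem _ _
        (fun acc k => if k ≤ jns.1 then acc else acc ++ gB1 bd jns k) acc ?_).trans ?_
    · intro acc k _
      by_cases h : k ≤ jns.1
      · simp [h]
      · simp only [if_neg h]
        by_cases hc : (PySem.Dict.ofList bd).contains k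
        · simp only [if_pos hc]
          rw [PySem.List.foldl_append_ite (p := fun i => i ≠ k) (f := fun i => (i, jns.1, k)),
              PySem.List.foldl_append_ite (p := fun i => i ≠ jns.1) (f := fun i => (i, k, jns.1)),
              List.append_assoc]
          simp only [gB1, if_pos hc]
        · simp only [if_neg hc]
          rw [PySem.List.foldl_append_ite (p := fun i => i ≠ k) (f := fun i => (i, jns.1, k))]
          simp only [gB1, if_neg hc, List.append_nil]
    · exact foldl_skip_append (fun k => k ≤ jns.1) (fun k => gB1 bd jns k) jns.2 acc
  have hang :
      (PySem.Dict.ofList bd).items.foldl (fun acc jns =>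
          jns.2.foldl (fun acc k =>
            if k ≤ jns.1 then acc else
            if (PySem.Dict.ofList bd).contains k then
              ((PySem.Dict.ofList bd).getD k []).foldl (fun acc i =>
                  if i ≠ jns.1 then acc ++ [(i, k, jns.1)] else acc)
                (jns.2.foldl (fun acc i =>
                  if i ≠ k then acc ++ [(i, jns.1, k)] else acc) acc)
            else
              jns.2.foldl (fun acc i =>
                if i ≠ k then acc ++ [(i, jns.1, k)] else acc) acc) acc)
        ([] : List (Int × Int × Int))
        = angB bd := by
    refine (PySem.List.foldl_congr_mem _ _
        (fun acc jns => acc ++ (jns.2.filter (fun k => decide (¬ k ≤ jns.1))).flatMap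
          (fun k => gB1 bd jns k)) _ ?_).trans ?_
    · intro acc jns _; exact hk1 jns acc
    · rw [PySem.List.foldl_append_eq_flatMap, List.nil_append, angB_eq_flat]
  rw [hang]
  have hext : ∀ (t : Int × Int × Int) (seen : PySem.Set (Int × Int × Int × Int)),
      ((PySem.Dict.ofList bd).getD t.2.2 []).foldl (fun seen l =>
          if l ≠ t.2.1 ∧ l ≠ t.1 then
            PySem.Set.add seen (pymin4 (t.1, t.2.1, t.2.2, l) (l, t.2.2, t.2.1, t.1))
          else seen) seen
        = (extB bd t).foldl PySem.Set.add seen := by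
    intro t seen
    refine (PySem.List.foldl_ite_eq_foldl_filter _ _ _ _).trans ?_
    exact List.foldl_map.symm
  have hseen :
      (angB bd).foldl (fun seen t =>
          ((PySem.Dict.ofList bd).getD t.2.2 []).foldl (fun seen l =>
            if l ≠ t.2.1 ∧ l ≠ t.1 then
              PySem.Set.add seen (pymin4 (t.1, t.2.1, t.2.2, l) (l, t.2.2, t.2.1, t.1))
            else seen) seen)
        (PySem.Set.empty : PySem.Set (Int × Int × Int × Int))
        = PySem.Set.ofList (csB bd) := by
    refine (PySem.List.foldl_congr_mem _ _
        (fun seen t => (extB bd t).foldl PySem.Set.add seen) _ ?_).trans ?_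
    · intro seen t _; exact hext t seen
    · rw [csB_eq_flat]
      exact List.foldl_flatMap.symm.trans (PySem.Set.ofList_eq_foldl _).symm
  rw [hseen]

theorem mem_csB_iff (bd : List (Int × List Int)) (x : Int × Int × Int × Int) :
    x ∈ csB bd ↔ x ∈ csA bd := by
  constructor
  · intro hx
    rw [csB_eq_flat, List.mem_flatMap] at hx
    obtain ⟨t, ht, hxt⟩ := hx
    rw [angB_eq_flat, List.mem_flatMap] at ht
    obtain ⟨jns, hjns, ht2⟩ := ht
    rw [List.mem_flatMap] at ht2
    obtain ⟨k, hkmem, ht3⟩ := ht2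
    rw [List.mem_filter, decide_eq_true_eq] at hkmem
    rw [gB1, List.mem_append] at ht3
    rw [csA_eq_flat, List.mem_flatMap]
    refine ⟨jns, hjns, ?_⟩
    rw [gkA, List.mem_flatMap]
    refine ⟨k, List.mem_filter.mpr ⟨hkmem.1, by simp only [decide_eq_true_eq]; exact hkmem.2⟩, ?_⟩
    rw [giA, List.mem_flatMap]
    rcases ht3 with h1 | h2
    · -- forward angle (i, j, k): contributes exactly A's inner list
      rw [List.mem_map] at h1
      obtain ⟨i, hi, hti⟩ := h1
      rw [List.mem_filter, decide_eq_true_eq] at hi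
      subst hti
      refine ⟨i, List.mem_filter.mpr ⟨hi.1, by simp only [decide_eq_true_eq]; exact hi.2⟩, ?_⟩
      simp only [extB, glA, List.mem_map, List.mem_filter, decide_eq_true_eq] at hxt ⊢
      exact hxt
    · -- reversed angle (i, k, j): same canonical tuples, i and l swapped
      by_cases hc : (PySem.Dict.ofList bd).contains k
      case neg => rw [if_neg hc] at h2; exact absurd h2 (List.not_mem_nil)
      rw [if_pos hc, List.mem_map] at h2
      obtain ⟨i, hi, hti⟩ := h2
      rw [List.mem_filter, decide_eq_true_eq] at hi
      subst hti
      have hjv : (PySem.Dict.ofList bd).getD jns.1 [] = jns.2 := by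
        refine PySem.Dict.getD_of_mem_items _ ?_ (PySem.Dict.nodup_keys_ofList bd) []
        simpa using hjns
      simp only [extB, List.mem_map, List.mem_filter, decide_eq_true_eq] at hxt
      obtain ⟨l, ⟨hlmem, hlk, hli⟩, hxe⟩ := hxt
      rw [hjv] at hlmem
      refine ⟨l, List.mem_filter.mpr ⟨hlmem, by simp only [decide_eq_true_eq]; exact hlk⟩, ?_⟩
      simp only [glA, List.mem_map, List.mem_filter, decide_eq_true_eq]
      exact ⟨i, ⟨hi.1, hi.2, fun h => hli h.symm⟩, (pymin4_comm _ _).trans hxe⟩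
  · intro hx
    rw [csA_eq_flat, List.mem_flatMap] at hx
    obtain ⟨jns, hjns, hx2⟩ := hx
    rw [gkA, List.mem_flatMap] at hx2
    obtain ⟨k, hkmem, hx3⟩ := hx2
    rw [giA, List.mem_flatMap] at hx3
    obtain ⟨i, himem, hx4⟩ := hx3
    rw [List.mem_filter, decide_eq_true_eq] at hkmem himem
    rw [csB_eq_flat, List.mem_flatMap]
    refine ⟨(i, jns.1, k), ?_, ?_⟩
    · rw [angB_eq_flat, List.mem_flatMap]
      refine ⟨jns, hjns, ?_⟩
      rw [List.mem_flatMap]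
      refine ⟨k, List.mem_filter.mpr ⟨hkmem.1, by simp only [decide_eq_true_eq]; exact hkmem.2⟩, ?_⟩
      rw [gB1, List.mem_append]
      exact Or.inl (List.mem_map.mpr
        ⟨i, List.mem_filter.mpr ⟨himem.1, by simp only [decide_eq_true_eq]; exact himem.2⟩, rfl⟩)
    · simp only [extB, glA, List.mem_map, List.mem_filter, decide_eq_true_eq] at hx4 ⊢
      exact hx4

-- ===== VERDICT (by name: the statement is the Claim_ definition above) =====
theorem enumerate_torsions_spec : Claim_equal_enumerate_torsions := by
  intro bd _ _
  unfold Spec_enumerate_torsions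
  rw [A_eq, B_eq]
  have hperm : (PySem.Set.ofList (csA bd)).Perm (PySem.Set.ofList (csB bd)) := by
    rw [List.perm_ext_iff_of_nodup (PySem.Set.nodup_ofList _) (PySem.Set.nodup_ofList _)]
    intro a
    rw [PySem.Set.mem_ofList, PySem.Set.mem_ofList, mem_csB_iff]
  have h := PySem.List.sorted_eq_sorted_of_perm _ _ tkey4 tkey4_inj hperm
  convert h using 2
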